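-- pv_equiv track=rewrite | github.com/qsyPython/ArithmeticNice | qsy/arithmetic/14_2_rotate_pic.py | rotate_pic
-- ===== SOURCE A (Python) =====
-- def level_rotate(origin_list):
--     # 翻转list
--     def revese_list(list, start, end):
--         while start < end:
--             temp = list[start]
--             list[start] = list[end]
--             list[end] = temp
--             start += 1
--             end -= 1
--     for list in origin_list:
--         revese_list(list,0,len(list)-1)
--     return origin_list
--
-- def rotate_pic(origin_list):
--     # 反转list值
--     def exchange_value(list):
--         for index,item in enumerate(list):
--             if item == 0:
--                 list[index] = 1
--             else:
--                 list[index] = 0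
--         return list
--
--     level_rotate(origin_list)
--     for list in origin_list:
--         exchange_value(list)
--     return origin_list
-- ===== SOURCE B (Python) =====
-- def rotate_pic(origin_list):
--     # One left-to-right pass per row: prepend the inverted value to an
--     # accumulator, so the reversal emerges from the accumulator order
--     # (no reversed(), no index swapping). Row lists are mutated in place.
--     for row in origin_list:
--         acc = []
--         for v in row:
--             acc = [(0 if v else 1)] + acc
--         row[:] = acc
--     return origin_list
-- ===== Notes on version B (the rewrite author's own statement) =====
-- stated objective: alternative
-- what changed: Replaces A's two staged in-place passes per row (two-pointer index-swapping reverse, then an enumerate-and-set inversion pass) by a single left-to-right consumption of each row into a prepend accumulator: each value is inverted as it is read and consed onto the front of a fresh list, so the reversal is produced by the accumulator order rather than by any reversing pass or index arithmetic.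
import Mathlib
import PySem

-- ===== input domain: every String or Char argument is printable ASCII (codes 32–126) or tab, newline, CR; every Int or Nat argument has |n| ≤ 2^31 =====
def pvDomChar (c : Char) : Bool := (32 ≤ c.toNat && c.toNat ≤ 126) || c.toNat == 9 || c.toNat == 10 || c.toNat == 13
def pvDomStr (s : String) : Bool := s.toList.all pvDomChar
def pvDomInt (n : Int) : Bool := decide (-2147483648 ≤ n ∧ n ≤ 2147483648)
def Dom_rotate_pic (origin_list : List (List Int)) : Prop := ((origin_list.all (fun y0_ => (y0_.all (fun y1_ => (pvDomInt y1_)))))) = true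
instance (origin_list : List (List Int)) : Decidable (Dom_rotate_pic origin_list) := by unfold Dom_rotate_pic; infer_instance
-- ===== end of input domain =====

-- B replaces A's two staged in-place passes per row (two-pointer reverse, then inversion pass)
-- by one left-to-right pass that prepends each inverted value to a fresh accumulator (objective:
-- alternative). Both Pythons mutate the rows of origin_list in place and return the same object;
-- the equivalence proved here is about the returned value.

-- ===== PORT A =====
-- helper revese_list: while start < end: swap list[start], list[end]; start += 1; end -= 1
-- (indices are always in range when the loop body runs, so getD/set are exact here)
def reveseList (l : List Int) (start fin : Int) : List Int :=
  if start < fin then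
    let temp := l.getD start.toNat 0
    let l1 := l.set start.toNat (l.getD fin.toNat 0)
    let l2 := l1.set fin.toNat temp
    reveseList l2 (start + 1) (fin - 1)
  else l
termination_by (fin - start).toNat
decreasing_by simp at *; omega

def level_rotate (origin_list : List (List Int)) : List (List Int) :=
  origin_list.map (fun l => reveseList l 0 ((l.length : Int) - 1))

-- helper exchange_value: for index,item in enumerate(list): list[index] = 1 if item == 0 else 0
def exchange_value (l : List Int) : List Int :=
  (PySem.List.enumerate l).foldl
    (fun acc p => acc.set p.1.toNat (if p.2 = 0 then 1 else 0)) l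

def rotate_pic (origin_list : List (List Int)) : List (List Int) :=
  (level_rotate origin_list).map exchange_value

-- ===== PORT B =====
-- for row: acc = []; for v in row: acc = [(0 if v else 1)] + acc; row[:] = acc
def rotate_pic_alt (origin_list : List (List Int)) : List (List Int) :=
  origin_list.map (fun row =>
    row.foldl (fun acc v => (if v ≠ 0 then 0 else 1) :: acc) [])

-- ===== PRECONDITION & SPEC =====
def Spec_rotate_pic (origin_list : List (List Int)) (out : List (List Int)) : Prop := out = rotate_pic_alt origin_list
instance (origin_list : List (List Int)) (out : List (List Int)) : Decidable (Spec_rotate_pic origin_list out) := by unfold Spec_rotate_pic; infer_instance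

-- ===== CLAIM (what is proved, stated in full; the proofs are below) =====
def Claim_equal_rotate_pic : Prop := ∀ (origin_list : List (List Int)), Dom_rotate_pic origin_list → Spec_rotate_pic origin_list (rotate_pic origin_list)

-- ===== LEMMAS AND PROOFS =====

theorem getD_at_len (p r : List Int) (x : Int) : (p ++ x :: r).getD p.length 0 = x := by
  rw [List.getD_append_right _ _ _ _ (Nat.le_refl _)]
  simp

theorem set_at_len (p r : List Int) (x v : Int) : (p ++ x :: r).set p.length v = p ++ v :: r := by
  rw [List.set_append]
  simp

-- the two-pointer while-loop reverses exactly the segment [start, fin] of the list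
theorem reveseList_segment : ∀ (n : Nat) (m p q : List Int), m.length = n →
    reveseList (p ++ m ++ q) (p.length : Int) ((p.length : Int) + (m.length : Int) - 1)
      = p ++ m.reverse ++ q := by
  intro n
  induction n using Nat.strong_induction_on with
  | _ n ih =>
  intro m p q hm
  rw [reveseList]
  by_cases hlen : m.length ≤ 1
  · rw [if_neg (by omega)]
    match m, hlen with
    | [], _ => simp
    | [x], _ => simp
  · obtain ⟨x, t, rfl⟩ : ∃ x t, m = x :: t := by
      cases m with
      | nil => simp at hlen
      | cons a b => exact ⟨a, b, rfl⟩
    rcases t.eq_nil_or_concat with rfl | ⟨mid, y, rfl⟩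
    · simp at hlen
    simp only [List.concat_eq_append] at *
    rw [if_pos (by simp; omega)]
    have hfin : ((p.length : Int) + (((x :: (mid ++ [y])).length : Int)) - 1)
        = (((p ++ x :: mid).length : Nat) : Int) := by simp; omega
    rw [hfin]
    simp only [Int.toNat_natCast]
    have hL : p ++ x :: (mid ++ [y]) ++ q = p ++ x :: (mid ++ y :: q) := by simp
    have hL2 : p ++ x :: (mid ++ y :: q) = (p ++ x :: mid) ++ y :: q := by simp
    have hget1 : (p ++ x :: (mid ++ [y]) ++ q).getD p.length 0 = x := by
      rw [hL, getD_at_len]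
    have hget2 : (p ++ x :: (mid ++ [y]) ++ q).getD (p ++ x :: mid).length 0 = y := by
      rw [hL, hL2, getD_at_len]
    rw [hget1, hget2]
    have hset1 : (p ++ x :: (mid ++ [y]) ++ q).set p.length y = p ++ y :: (mid ++ y :: q) := by
      rw [hL, set_at_len]
    rw [hset1]
    have hset2 : (p ++ y :: (mid ++ y :: q)).set (p ++ x :: mid).length x
        = (p ++ [y]) ++ mid ++ ([x] ++ q) := by
      have h3 : p ++ y :: (mid ++ y :: q) = (p ++ y :: mid) ++ y :: q := by simp
      have h4 : (p ++ x :: mid).length = (p ++ y :: mid).length := by simp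
      rw [h3, h4, set_at_len]
      simp
    rw [hset2]
    have e1 : (p.length : Int) + 1 = (((p ++ [y]).length : Nat) : Int) := by simp
    have e2 : (((p ++ x :: mid).length : Nat) : Int) - 1
        = (((p ++ [y]).length : Nat) : Int) + ((mid.length : Nat) : Int) - 1 := by
      simp; omega
    rw [e1, e2, ih mid.length (by omega) mid (p ++ [y]) ([x] ++ q) rfl]
    simp

theorem reveseList_full (l : List Int) :
    reveseList l 0 ((l.length : Int) - 1) = l.reverse := by
  have h := reveseList_segment l.length l [] [] rfl
  simpa using h

-- the enumerate-and-set loop rewrites the covered segment to its pointwise inversion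
theorem fold_set_inv : ∀ (m b a c : List Int), b.length = m.length →
    (PySem.List.enumerate m ((a.length : Nat) : Int)).foldl
      (fun acc p => acc.set p.1.toNat (if p.2 = 0 then 1 else 0)) (a ++ b ++ c)
    = a ++ m.map (fun v => if v = 0 then 1 else 0) ++ c := by
  intro m
  induction m with
  | nil =>
    intro b a c hb
    simp only [List.length_nil, List.length_eq_zero_iff] at hb
    subst hb
    simp [PySem.List.enumerate]
  | cons x m ih =>
    intro b a c hb
    cases b with
    | nil => simp at hb
    | cons y b' =>
      rw [PySem.List.enumerate_cons, List.foldl_cons]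
      have h1 : a ++ y :: b' ++ c = a ++ y :: (b' ++ c) := by simp
      have h2 : ((a.length : Int)).toNat = a.length := Int.toNat_natCast _
      rw [h1, h2, set_at_len]
      have h3 : a ++ (if x = 0 then 1 else 0) :: (b' ++ c)
          = (a ++ [if x = 0 then 1 else 0]) ++ b' ++ c := by simp
      have h4 : ((a.length : Int)) + 1 = (((a ++ [if x = 0 then 1 else 0]).length : Nat) : Int) := by
        simp
      rw [h3, h4, ih b' (a ++ [if x = 0 then 1 else 0]) c (by simpa using hb)]
      simp

theorem exchange_value_eq_map (l : List Int) :
    exchange_value l = l.map (fun v => if v = 0 then 1 else 0) := by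
  have h := fold_set_inv l l [] [] rfl
  simpa [exchange_value] using h

-- B's prepend-accumulator fold produces the reversed map
theorem foldl_cons_inv (l acc : List Int) :
    l.foldl (fun acc v => (if v ≠ 0 then 0 else 1) :: acc) acc
      = (l.map (fun v => if v ≠ 0 then 0 else 1)).reverse ++ acc := by
  induction l generalizing acc with
  | nil => simp
  | cons x t ih => simp

-- ===== VERDICT (by name: the statement is the Claim_ definition above) =====
theorem rotate_pic_spec : Claim_equal_rotate_pic := by
  intro l _
  unfold Spec_rotate_pic rotate_pic rotate_pic_alt level_rotate
  simp only [List.map_map]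
  apply List.map_congr_left
  intro r _
  simp only [Function.comp, reveseList_full, exchange_value_eq_map, foldl_cons_inv,
    List.append_nil, ← List.map_reverse]
  apply List.map_congr_left
  intro v _
  by_cases h : v = 0 <;> simp [h]
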